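-- pv_equiv track=rewrite | github.com/gregorian-09/orderflow | dashboard/server.py | _level_summary
-- ===== SOURCE A (Python) =====
-- from typing import Any, Dict, List, Optional
--
-- def _level_summary(levels: List[Dict[str, Any]]) -> Dict[str, int]:
--     buy_volume = 0
--     sell_volume = 0
--     imbalance_ask = 0
--     imbalance_bid = 0
--     stacked_ask = 0
--     stacked_bid = 0
--     ask_run = 0
--     bid_run = 0
--     for idx, row in enumerate(levels):
--         ask = max(0, int(row.get("ask", 0) or 0))
--         bid = max(0, int(row.get("bid", 0) or 0))
--         buy_volume += ask
--         sell_volume += bid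
--         below_bid = max(0, int(levels[idx + 1].get("bid", 0) or 0)) if idx + 1 < len(levels) else 0
--         above_ask = max(0, int(levels[idx - 1].get("ask", 0) or 0)) if idx > 0 else 0
--         ask_imbalance = ask > 0 and (below_bid == 0 or ask >= below_bid * 3)
--         bid_imbalance = bid > 0 and (above_ask == 0 or bid >= above_ask * 3)
--         if ask_imbalance:
--             imbalance_ask += 1
--             ask_run += 1
--         else:
--             ask_run = 0
--         if bid_imbalance:
--             imbalance_bid += 1
--             bid_run += 1
--         else:
--             bid_run = 0
--         stacked_ask = max(stacked_ask, ask_run)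
--         stacked_bid = max(stacked_bid, bid_run)
--     return {
--         "buy_volume": buy_volume,
--         "sell_volume": sell_volume,
--         "imbalance_ask": imbalance_ask,
--         "imbalance_bid": imbalance_bid,
--         "stacked_ask": stacked_ask,
--         "stacked_bid": stacked_bid,
--     }
-- ===== SOURCE B (Python) =====
-- def _longest_run(flags):
--     best = 0
--     cur = 0
--     for f in flags:
--         cur = cur + 1 if f else 0
--         if cur > best:
--             best = cur
--     return best
--
--
-- def _level_summary(levels):
--     pairs = [(max(0, int(row.get("ask", 0) or 0)), max(0, int(row.get("bid", 0) or 0)))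
--              for row in levels]
--     buy_volume = sum(a for a, _ in pairs)
--     sell_volume = sum(b for _, b in pairs)
--     next_bids = [b for _, b in pairs[1:]] + [0]
--     prev_asks = [0] + [a for a, _ in pairs[:-1]]
--     ask_flags = [a > 0 and (nb == 0 or a >= nb * 3) for (a, _), nb in zip(pairs, next_bids)]
--     bid_flags = [b > 0 and (pa == 0 or b >= pa * 3) for (_, b), pa in zip(pairs, prev_asks)]
--     return {
--         "buy_volume": buy_volume,
--         "sell_volume": sell_volume,
--         "imbalance_ask": sum(ask_flags),
--         "imbalance_bid": sum(bid_flags),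
--         "stacked_ask": _longest_run(ask_flags),
--         "stacked_bid": _longest_run(bid_flags),
--     }
-- ===== Notes on version B (the rewrite author's own statement) =====
-- stated objective: simpler
-- what changed: A's single indexed loop carrying eight mutable counters is replaced by a staged pipeline: clean the levels once into (ask,bid) pairs, then compute the volumes as sums, the imbalance flags by zipping each level with its shifted neighbour list, and the counts and longest-run statistics from those flag lists.
import Mathlib
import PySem

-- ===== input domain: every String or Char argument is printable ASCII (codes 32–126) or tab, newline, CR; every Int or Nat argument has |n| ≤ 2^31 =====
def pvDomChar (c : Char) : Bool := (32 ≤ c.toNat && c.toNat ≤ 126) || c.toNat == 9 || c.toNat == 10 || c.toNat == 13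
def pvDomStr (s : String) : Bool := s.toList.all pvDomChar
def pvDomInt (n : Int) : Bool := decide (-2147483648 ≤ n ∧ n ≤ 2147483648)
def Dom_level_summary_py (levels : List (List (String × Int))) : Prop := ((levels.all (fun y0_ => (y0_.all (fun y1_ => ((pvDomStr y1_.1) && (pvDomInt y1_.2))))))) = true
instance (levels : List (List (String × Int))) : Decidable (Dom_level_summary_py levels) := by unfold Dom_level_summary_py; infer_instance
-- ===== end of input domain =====

-- B replaces A's single indexed loop over eight counters by a staged pipeline
-- (clean pairs, sums, zipped neighbour flag lists, count and longest-run): simpler decomposition, same cost.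

-- ===== PORT A =====
-- the body of A's for-loop; state = (buy_volume, sell_volume, imbalance_ask, imbalance_bid, stacked_ask, stacked_bid, ask_run, bid_run)
def pvStepA (levels : List (List (String × Int)))
    (st : Int × Int × Int × Int × Int × Int × Int × Int)
    (ir : Int × List (String × Int)) : Int × Int × Int × Int × Int × Int × Int × Int :=
  let (buy, sell, ia, ib, sa, sb, ar, br) := st
  let (idx, row) := ir
  -- int(row.get("ask", 0) or 0): the values are ints already, and `v or 0` is `v` for v ≠ 0 and 0 for v = 0, i.e. the identity
  let ask := max 0 ((PySem.Dict.mk row).getD "ask" 0)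
  let bid := max 0 ((PySem.Dict.mk row).getD "bid" 0)
  let buy := buy + ask
  let sell := sell + bid
  -- levels[idx + 1] / levels[idx - 1]: guarded in range, so `.getD []` never supplies the default
  let below_bid := if idx + 1 < (levels.length : Int) then
      max 0 ((PySem.Dict.mk ((PySem.List.pyGet? levels (idx + 1)).getD [])).getD "bid" 0)
    else 0
  let above_ask := if 0 < idx then
      max 0 ((PySem.Dict.mk ((PySem.List.pyGet? levels (idx - 1)).getD [])).getD "ask" 0)
    else 0
  let ask_imb := decide (0 < ask) && (below_bid == 0 || decide (below_bid * 3 ≤ ask))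
  let bid_imb := decide (0 < bid) && (above_ask == 0 || decide (above_ask * 3 ≤ bid))
  let ia := if ask_imb then ia + 1 else ia
  let ar := if ask_imb then ar + 1 else 0
  let ib := if bid_imb then ib + 1 else ib
  let br := if bid_imb then br + 1 else 0
  (buy, sell, ia, ib, max sa ar, max sb br, ar, br)

def level_summary_py (levels : List (List (String × Int))) : List (String × Int) :=
  let st := (PySem.List.enumerate levels).foldl (pvStepA levels) (0, 0, 0, 0, 0, 0, 0, 0)
  [("buy_volume", st.1), ("sell_volume", st.2.1),
   ("imbalance_ask", st.2.2.1), ("imbalance_bid", st.2.2.2.1),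
   ("stacked_ask", st.2.2.2.2.1), ("stacked_bid", st.2.2.2.2.2.1)]

-- ===== PORT B =====
-- Source B's _longest_run
def pvLongestRun (flags : List Bool) : Int :=
  (flags.foldl (fun st f =>
      let cur := if f then st.2 + 1 else 0
      (if st.1 < cur then cur else st.1, cur)) ((0 : Int), (0 : Int))).1

-- Source B's pair-cleaning comprehension body
def pvClean (row : List (String × Int)) : Int × Int :=
  (max 0 ((PySem.Dict.mk row).getD "ask" 0), max 0 ((PySem.Dict.mk row).getD "bid" 0))

def level_summary_py_alt (levels : List (List (String × Int))) : List (String × Int) :=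
  let pairs := levels.map pvClean
  let buy := (pairs.map (·.1)).sum
  let sell := (pairs.map (·.2)).sum
  let next_bids := (PySem.List.slice pairs (some 1) none).map (·.2) ++ [0]      -- pairs[1:]
  let prev_asks := 0 :: (PySem.List.slice pairs none (some (-1))).map (·.1)     -- pairs[:-1]
  let ask_flags := (pairs.zip next_bids).map
      (fun pn => decide (0 < pn.1.1) && (pn.2 == 0 || decide (pn.2 * 3 ≤ pn.1.1)))
  let bid_flags := (pairs.zip prev_asks).map
      (fun pn => decide (0 < pn.1.2) && (pn.2 == 0 || decide (pn.2 * 3 ≤ pn.1.2)))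
  [("buy_volume", buy), ("sell_volume", sell),
   ("imbalance_ask", (ask_flags.count true : Int)),
   ("imbalance_bid", (bid_flags.count true : Int)),
   ("stacked_ask", pvLongestRun ask_flags), ("stacked_bid", pvLongestRun bid_flags)]

-- ===== PRECONDITION & SPEC =====
def Spec_level_summary_py (levels : List (List (String × Int))) (out : List (String × Int)) : Prop := out = level_summary_py_alt levels
instance (levels : List (List (String × Int))) (out : List (String × Int)) : Decidable (Spec_level_summary_py levels out) := by unfold Spec_level_summary_py; infer_instance

-- ===== CLAIM (what is proved, stated in full; the proofs are below) =====
def Claim_equal_level_summary_py : Prop := ∀ (levels : List (List (String × Int))), Dom_level_summary_py levels → Spec_level_summary_py levels (level_summary_py levels)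

-- ===== LEMMAS AND PROOFS =====

-- bid of the first element, 0 if none (the "below_bid" seen from the previous level)
def pvHeadBid : List (Int × Int) → Int
  | [] => 0
  | p :: _ => p.2

-- A's loop, re-expressed as structural recursion over the cleaned pairs, carrying the previous ask
def pvSpecA (prev : Int) (st : Int × Int × Int × Int × Int × Int × Int × Int) :
    List (Int × Int) → Int × Int × Int × Int × Int × Int × Int × Int
  | [] => st
  | p :: rest =>
      let (buy, sell, ia, ib, sa, sb, ar, br) := st
      let nb := pvHeadBid rest
      let af := decide (0 < p.1) && (nb == 0 || decide (nb * 3 ≤ p.1))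
      let bf := decide (0 < p.2) && (prev == 0 || decide (prev * 3 ≤ p.2))
      let ia' := if af then ia + 1 else ia
      let ar' := if af then ar + 1 else 0
      let ib' := if bf then ib + 1 else ib
      let br' := if bf then br + 1 else 0
      pvSpecA p.1 (buy + p.1, sell + p.2, ia', ib', max sa ar', max sb br', ar', br') rest

def pvPrevAsk (pre : List (List (String × Int))) : Int :=
  match pre.getLast? with
  | none => 0
  | some r => (pvClean r).1

def pvAskFlags : List (Int × Int) → List Bool
  | [] => []
  | p :: rest => (decide (0 < p.1) && (pvHeadBid rest == 0 || decide (pvHeadBid rest * 3 ≤ p.1))) :: pvAskFlags rest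

def pvBidFlags (prev : Int) : List (Int × Int) → List Bool
  | [] => []
  | p :: rest => (decide (0 < p.2) && (prev == 0 || decide (prev * 3 ≤ p.2))) :: pvBidFlags p.1 rest

def pvRunStep (st : Int × Int) (f : Bool) : Int × Int :=
  let cur := if f then st.2 + 1 else 0
  (if st.1 < cur then cur else st.1, cur)

theorem pvRunStep_eq (b c : Int) (f : Bool) :
    pvRunStep (b, c) f = (max b (if f then c + 1 else 0), if f then c + 1 else 0) := by
  simp only [pvRunStep, Prod.mk.injEq]
  refine ⟨?_, trivial⟩
  rw [max_def]
  split_ifs <;> omega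

theorem pvLongestRun_eq (flags : List Bool) :
    pvLongestRun flags = (flags.foldl pvRunStep (0, 0)).1 := rfl

theorem pvPrevAsk_concat (pre : List (List (String × Int))) (r : List (String × Int)) :
    pvPrevAsk (pre ++ [r]) = (pvClean r).1 := by
  simp [pvPrevAsk]

-- what one iteration of A's loop body does, expressed over the cleaned values
theorem pvStepA_eq (pre rest : List (List (String × Int))) (r : List (String × Int))
    (buy sell ia ib sa sb ar br : Int) :
    pvStepA (pre ++ r :: rest) (buy, sell, ia, ib, sa, sb, ar, br) ((pre.length : Int), r) =
      (let p := pvClean r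
       let nb := pvHeadBid (rest.map pvClean)
       let prev := pvPrevAsk pre
       let af := decide (0 < p.1) && (nb == 0 || decide (nb * 3 ≤ p.1))
       let bf := decide (0 < p.2) && (prev == 0 || decide (prev * 3 ≤ p.2))
       (buy + p.1, sell + p.2, if af then ia + 1 else ia, if bf then ib + 1 else ib,
        max sa (if af then ar + 1 else 0), max sb (if bf then br + 1 else 0),
        if af then ar + 1 else 0, if bf then br + 1 else 0)) := by
  have hbb : (if (pre.length : Int) + 1 < ((pre ++ r :: rest).length : Int) then
      max 0 ((PySem.Dict.mk ((PySem.List.pyGet? (pre ++ r :: rest) ((pre.length : Int) + 1)).getD [])).getD "bid" 0)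
    else 0) = pvHeadBid (rest.map pvClean) := by
    cases rest with
    | nil =>
      have hc : ¬ ((pre.length : Int) + 1 < ((pre ++ [r]).length : Int)) := by
        simp [List.length_append]
      rw [if_neg hc]; rfl
    | cons q r2 =>
      have hc : (pre.length : Int) + 1 < ((pre ++ r :: q :: r2).length : Int) := by
        push_cast [List.length_append, List.length_cons]
        omega
      rw [if_pos hc]
      have hg : PySem.List.pyGet? (pre ++ r :: q :: r2) ((pre.length : Int) + 1) = some q := by
        have h1 : (pre.length : Int) + 1 = ((pre.length + 1 : Nat) : Int) := by push_cast; ring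
        rw [h1, PySem.List.pyGet?_natCast, List.getElem?_append_right (by omega)]
        simp
      rw [hg]
      rfl
  have haa : (if 0 < (pre.length : Int) then
      max 0 ((PySem.Dict.mk ((PySem.List.pyGet? (pre ++ r :: rest) ((pre.length : Int) - 1)).getD [])).getD "ask" 0)
    else 0) = pvPrevAsk pre := by
    cases hpre : pre.getLast? with
    | none =>
      have : pre = [] := List.getLast?_eq_none_iff.mp hpre
      subst this
      rw [if_neg (by simp)]; rfl
    | some z =>
      have hne : pre ≠ [] := by
        intro h; subst h; simp at hpre
      have hlen : 0 < pre.length := List.length_pos_iff.mpr hne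
      rw [if_pos (by exact_mod_cast hlen)]
      have hg : PySem.List.pyGet? (pre ++ r :: rest) ((pre.length : Int) - 1) = some z := by
        have h1 : (pre.length : Int) - 1 = ((pre.length - 1 : Nat) : Int) := by omega
        rw [h1, PySem.List.pyGet?_natCast, List.getElem?_append_left (by omega)]
        rw [← List.getLast?_eq_getElem?]
        exact hpre
      rw [hg]
      simp [pvPrevAsk, hpre, pvClean]
  simp only [pvStepA]
  rw [hbb, haa]
  simp [pvClean]

theorem pvFoldA (suf : List (List (String × Int))) : ∀ (pre : List (List (String × Int)))
    (st : Int × Int × Int × Int × Int × Int × Int × Int),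
    (PySem.List.enumerate suf (pre.length : Int)).foldl (pvStepA (pre ++ suf)) st
      = pvSpecA (pvPrevAsk pre) st (suf.map pvClean) := by
  induction suf with
  | nil =>
    intro pre st
    simp [PySem.List.enumerate_nil, pvSpecA]
  | cons r rest ih =>
    intro pre st
    obtain ⟨buy, sell, ia, ib, sa, sb, ar, br⟩ := st
    rw [PySem.List.enumerate_cons, List.foldl_cons, pvStepA_eq]
    have h1 : (pre.length : Int) + 1 = (((pre ++ [r]).length : Nat) : Int) := by simp
    have h2 : pre ++ r :: rest = (pre ++ [r]) ++ rest := by simp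
    rw [h1, h2, ih (pre ++ [r]), pvPrevAsk_concat]
    rfl

theorem pvSpecA_char (ps : List (Int × Int)) : ∀ prev buy sell ia ib sa sb ar br,
    pvSpecA prev (buy, sell, ia, ib, sa, sb, ar, br) ps =
      (buy + (ps.map (·.1)).sum, sell + (ps.map (·.2)).sum,
       ia + ((pvAskFlags ps).count true : Int), ib + ((pvBidFlags prev ps).count true : Int),
       ((pvAskFlags ps).foldl pvRunStep (sa, ar)).1, ((pvBidFlags prev ps).foldl pvRunStep (sb, br)).1,
       ((pvAskFlags ps).foldl pvRunStep (sa, ar)).2, ((pvBidFlags prev ps).foldl pvRunStep (sb, br)).2) := by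
  induction ps with
  | nil =>
    intro prev buy sell ia ib sa sb ar br
    simp [pvSpecA, pvAskFlags, pvBidFlags]
  | cons p rest ih =>
    intro prev buy sell ia ib sa sb ar br
    simp only [pvSpecA, pvAskFlags, pvBidFlags, List.map_cons, List.sum_cons,
      List.count_cons, List.foldl_cons, pvRunStep_eq, ih, beq_true]
    simp only [Prod.mk.injEq]
    repeat' apply And.intro
    all_goals first
      | trivial
      | omega
      | (split_ifs <;> omega)

theorem pvAskFlags_eq (ps : List (Int × Int)) :
    (ps.zip ((ps.tail.map (·.2)) ++ [0])).map
      (fun pn => decide (0 < pn.1.1) && (pn.2 == 0 || decide (pn.2 * 3 ≤ pn.1.1)))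
      = pvAskFlags ps := by
  induction ps with
  | nil => rfl
  | cons p rest ih =>
    cases rest with
    | nil => rfl
    | cons q r2 =>
      simp only [List.tail_cons, List.map_cons, List.cons_append, List.zip_cons_cons,
        pvAskFlags, pvHeadBid]
      exact congrArg _ (by simpa using ih)

theorem pvZipDropLast (g : (Int × Int) → Int) (ps : List (Int × Int)) : ∀ (x : Int),
    ps.zip (x :: ps.dropLast.map g) = ps.zip (x :: ps.map g) := by
  induction ps with
  | nil => intro x; rfl
  | cons p rest ih =>
    intro x
    cases rest with
    | nil => rfl
    | cons q r2 =>
      show (p, x) :: ((q :: r2).zip (g p :: (q :: r2).dropLast.map g))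
          = (p, x) :: ((q :: r2).zip (g p :: (q :: r2).map g))
      exact congrArg _ (ih (g p))

theorem pvBidFlags_eq (ps : List (Int × Int)) : ∀ prev,
    (ps.zip (prev :: ps.dropLast.map (·.1))).map
      (fun pn => decide (0 < pn.1.2) && (pn.2 == 0 || decide (pn.2 * 3 ≤ pn.1.2)))
      = pvBidFlags prev ps := by
  intro prev
  rw [pvZipDropLast]
  induction ps generalizing prev with
  | nil => rfl
  | cons p rest ih =>
    rw [List.map_cons, List.zip_cons_cons, List.map_cons, pvBidFlags, ih p.1]

-- ===== VERDICT (by name: the statement is the Claim_ definition above) =====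
theorem level_summary_py_spec : Claim_equal_level_summary_py := by
  intro levels _
  show level_summary_py levels = level_summary_py_alt levels
  unfold level_summary_py level_summary_py_alt
  have hA := pvFoldA levels [] (0, 0, 0, 0, 0, 0, 0, 0)
  simp only [List.length_nil, Int.natCast_zero, List.nil_append] at hA
  have hp : pvPrevAsk [] = (0 : Int) := rfl
  rw [hp] at hA
  rw [hA, pvSpecA_char]
  simp only [PySem.List.slice_from_one, PySem.List.slice_to_neg_one,
    pvAskFlags_eq, pvBidFlags_eq, pvLongestRun_eq, zero_add]
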